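-- pv_equiv track=rewrite | github.com/jwerhebach/data_mc_plotter | scripts/aggregation_math.py | interpretate
-- ===== SOURCE A (Python) =====
-- OPS = ['*', '/', '+', '-']
--
-- def interpretate(s):
--     i = 0
--     while True:
--         if i < len(s):
--             s_i = s[i]
--             for o in OPS:
--                 if (o in s_i) and len(s_i) > 1:
--                     a, d, b = s_i.partition(o)
--                     if d == o:
--                         new_s = []
--                         for j, s_j in enumerate(s):
--                             if j == i:
--                                 new_s.append(a)
--                                 new_s.append(d)
--                                 new_s.append(b)
--                             else:
--                                 new_s.append(s_j)
--                         s = new_s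
--                         i += 1
--                         break
--             i += 1
--         else:
--             break
--     return s
-- ===== SOURCE B (Python) =====
-- OPS = ['*', '/', '+', '-']
--
-- def interpretate(s):
--     out = []
--     for tok in s:
--         n = len(tok)
--         cur = 0
--         while n - cur > 1:
--             p = -1
--             for o in OPS:
--                 q = tok.find(o, cur)
--                 if q != -1:
--                     p = q
--                     break
--             if p == -1:
--                 break
--             out.append(tok[cur:p])
--             out.append(tok[p])
--             cur = p + 1
--         out.append(tok[cur:])
--     return out
-- ===== Notes on version B (the rewrite author's own statement) =====
-- stated objective: alternative
-- what changed: A repeatedly rescans from a moving list index, testing each operator with 'in'+partition and rebuilding the entire list at every split; B keeps a per-token character cursor, does one find per step and appends index slices straight to the output, never rebuilding any list.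
import Mathlib
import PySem

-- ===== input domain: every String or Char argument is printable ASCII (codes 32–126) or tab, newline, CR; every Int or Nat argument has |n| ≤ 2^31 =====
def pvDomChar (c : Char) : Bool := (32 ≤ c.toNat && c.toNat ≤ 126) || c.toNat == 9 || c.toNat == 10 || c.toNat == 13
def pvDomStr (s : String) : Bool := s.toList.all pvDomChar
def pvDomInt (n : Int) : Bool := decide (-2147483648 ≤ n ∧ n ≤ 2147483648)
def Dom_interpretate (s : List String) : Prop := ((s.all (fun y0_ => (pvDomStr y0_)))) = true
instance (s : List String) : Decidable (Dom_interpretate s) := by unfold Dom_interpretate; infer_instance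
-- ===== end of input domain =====

-- B replaces A's index loop — which at every split rebuilds the whole list and rescans the
-- current element with 'in'/partition — by a per-token cursor: one find per step and slices
-- by index, never rebuilding any list (objective: alternative).

-- ===== PORT A =====
-- OPS = ['*','/','+','-']; the test "o in s_i and len(s_i) > 1" in that priority order
-- (ops are single characters, so Python's substring test 'o in s_i' is char membership;
-- Python strings are handled as List Char, exact on any input).
def pickOp (t : List Char) : Option Char :=
  if t.length > 1 then
    if t.contains '*' then some '*'
    else if t.contains '/' then some '/'
    else if t.contains '+' then some '+'
    else if t.contains '-' then some '-'
    else none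
  else none

-- s_i.partition(o): the part before the first o and the part after it
-- (Python's 'd == o' check always succeeds here since o ∈ s_i, so the guarded block always runs).
def partBefore (o : Char) (t : List Char) : List Char := t.takeWhile (· ≠ o)
def partAfter (o : Char) (t : List Char) : List Char := (t.dropWhile (· ≠ o)).drop 1

-- termination measure of A's while loop (needed by interpGo's decreasing_by)
def loopMeasure (s : List (List Char)) (i : Nat) : Nat :=
  ((s.drop i).map (fun t => t.length + 1)).sum

lemma pickOp_some (t : List Char) (o : Char) (h : pickOp t = some o) :
    o ∈ t ∧ 0 < t.length := by
  unfold pickOp at h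
  split_ifs at h with h1 h2 h3 h4 h5
  · cases h; exact ⟨by simpa using h2, by omega⟩
  · cases h; exact ⟨by simpa using h3, by omega⟩
  · cases h; exact ⟨by simpa using h4, by omega⟩
  · cases h; exact ⟨by simpa using h5, by omega⟩

lemma partAfter_lt (o : Char) (t : List Char) (h : o ∈ t) :
    (partAfter o t).length < t.length := by
  have hne : t.dropWhile (· ≠ o) ≠ [] := by
    intro hc
    have := List.dropWhile_eq_nil_iff.mp hc
    simp at this
    exact (this o h) rfl
  have h1 : (t.dropWhile (· ≠ o)).length ≤ t.length := List.length_dropWhile_le _ _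
  have h2 : 0 < (t.dropWhile (· ≠ o)).length := List.length_pos_iff.mpr hne
  unfold partAfter
  simp only [List.length_drop]
  omega

lemma loopMeasure_cons (s : List (List Char)) (i : Nat) (h : i < s.length) :
    loopMeasure s i = (s[i].length + 1) + loopMeasure s (i + 1) := by
  unfold loopMeasure
  rw [List.drop_eq_getElem_cons h]
  simp only [List.map_cons, List.sum_cons]

lemma drop_split (s : List (List Char)) (i : Nat) (h : i < s.length)
    (a x b : List Char) :
    (s.take i ++ [a, x, b] ++ s.drop (i + 1)).drop (i + 2) = b :: s.drop (i + 1) := by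
  have ht : (s.take i).length = i := List.length_take_of_le (by omega)
  rw [List.append_assoc]
  rw [show i + 2 = (s.take i).length + 2 by omega]
  rw [List.drop_append]
  simp [ht]

-- Python A: the while loop with index i over a list rebuilt in full at every split.
def interpGo (s : List (List Char)) (i : Nat) : List (List Char) :=
  if h : i < s.length then
    match hp : pickOp s[i] with
    | some o =>
        -- new_s = s with s[i] replaced by a, d, b; then i += 2 (the i += 1 before
        -- the break plus the i += 1 after the for loop)
        interpGo (s.take i ++ [partBefore o s[i], [o], partAfter o s[i]] ++ s.drop (i + 1)) (i + 2)
    | none => interpGo s (i + 1)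
  else s
termination_by loopMeasure s i
decreasing_by
  · have hm := pickOp_some _ _ hp
    have hlt := partAfter_lt o s[i] hm.1
    have h1 := loopMeasure_cons s i h
    have h2 : loopMeasure (s.take i ++ [partBefore o s[i], [o], partAfter o s[i]] ++ s.drop (i + 1)) (i + 2)
        = ((partAfter o s[i]).length + 1) + loopMeasure s (i + 1) := by
      unfold loopMeasure
      rw [drop_split s i h]
      simp only [List.map_cons, List.sum_cons]
    omega
  · have h1 := loopMeasure_cons s i h
    omega

def interpretate (s : List String) : List String :=
  (interpGo (s.map String.toList) 0).map (fun t => String.ofList t)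

-- ===== PORT B =====
-- tok.find(o, cur) for a single-character o: first index ≥ cur holding o, or none for -1.
-- Exact here since B only calls it with 0 ≤ cur (≤ len(tok)+1), where Python's find(sub, start)
-- returns the least absolute index ≥ start of the character, or -1.
def findFrom1 (t : List Char) (cur : Nat) (o : Char) : Option Nat :=
  ((t.drop cur).idxOf? o).map (· + cur)

-- the 'for o in OPS: q = tok.find(o, cur); if q != -1: break' inner loop: the chosen
-- operator and its absolute index, by priority
def pickFrom (t : List Char) (cur : Nat) : Option (Char × Nat) :=
  match findFrom1 t cur '*' with
  | some p => some ('*', p)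
  | none =>
    match findFrom1 t cur '/' with
    | some p => some ('/', p)
    | none =>
      match findFrom1 t cur '+' with
      | some p => some ('+', p)
      | none =>
        match findFrom1 t cur '-' with
        | some p => some ('-', p)
        | none => none

lemma findFrom1_some_bounds (t : List Char) (cur : Nat) (o : Char) (p : Nat)
    (h : findFrom1 t cur o = some p) : cur ≤ p ∧ p < t.length := by
  unfold findFrom1 at h
  cases hq : (t.drop cur).idxOf? o with
  | none => simp [hq] at h
  | some k =>
    simp [hq] at h
    obtain ⟨hk, -, -⟩ := List.idxOf?_eq_some_iff.mp hq
    simp only [List.length_drop] at hk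
    omega

lemma pickFrom_some_bounds (t : List Char) (cur : Nat) (o : Char) (p : Nat)
    (h : pickFrom t cur = some (o, p)) : cur ≤ p ∧ p < t.length := by
  unfold pickFrom at h
  cases h1 : findFrom1 t cur '*' with
  | some q => simp [h1] at h; exact h.2 ▸ findFrom1_some_bounds t cur '*' q h1
  | none =>
  cases h2 : findFrom1 t cur '/' with
  | some q => simp [h1, h2] at h; exact h.2 ▸ findFrom1_some_bounds t cur '/' q h2
  | none =>
  cases h3 : findFrom1 t cur '+' with
  | some q => simp [h1, h2, h3] at h; exact h.2 ▸ findFrom1_some_bounds t cur '+' q h3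
  | none =>
  cases h4 : findFrom1 t cur '-' with
  | some q => simp [h1, h2, h3, h4] at h; exact h.2 ▸ findFrom1_some_bounds t cur '-' q h4
  | none => simp [h1, h2, h3, h4] at h

-- the while loop over one token: emit tok[cur:p], tok[p], advance cur to p+1
def emitTok (t : List Char) (cur : Nat) : List (List Char) :=
  if t.length - cur > 1 then
    match hp : pickFrom t cur with
    | some (o, p) => ((t.drop cur).take (p - cur)) :: [o] :: emitTok t (p + 1)
    | none => [t.drop cur]
  else [t.drop cur]
termination_by t.length - cur
decreasing_by
  have := pickFrom_some_bounds t cur o p hp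
  omega

-- the outer for loop over the tokens, appending into out
def interpretate_alt (s : List String) : List String :=
  (s.flatMap (fun tok => emitTok tok.toList 0)).map (fun t => String.ofList t)

-- ===== PRECONDITION & SPEC =====
def Spec_interpretate (s : List String) (out : List String) : Prop := out = interpretate_alt s
instance (s : List String) (out : List String) : Decidable (Spec_interpretate s out) := by unfold Spec_interpretate; infer_instance

-- ===== CLAIM =====
def Claim_equal_interpretate : Prop := ∀ (s : List String), Dom_interpretate s → Spec_interpretate s (interpretate s)

-- ===== LEMMAS AND PROOFS =====

-- proof-only normal form: the pieces one token contributes, as A produces them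
def tokPieces (t : List Char) : List (List Char) :=
  match hp : pickOp t with
  | some o => partBefore o t :: [o] :: tokPieces (partAfter o t)
  | none => [t]
termination_by t.length
decreasing_by
  exact partAfter_lt o t (pickOp_some _ _ hp).1

lemma interpGo_done (s : List (List Char)) (i : Nat) (h : ¬ i < s.length) :
    interpGo s i = s := by
  rw [interpGo, dif_neg h]

lemma interpGo_split (s : List (List Char)) (i : Nat) (h : i < s.length)
    (o : Char) (hp : pickOp s[i] = some o) :
    interpGo s i
      = interpGo (s.take i ++ [partBefore o s[i], [o], partAfter o s[i]] ++ s.drop (i + 1)) (i + 2) := by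
  rw [interpGo, dif_pos h]
  split <;> simp_all

lemma interpGo_skip (s : List (List Char)) (i : Nat) (h : i < s.length)
    (hp : pickOp s[i] = none) :
    interpGo s i = interpGo s (i + 1) := by
  rw [interpGo, dif_pos h]
  split <;> simp_all

lemma tokPieces_some (t : List Char) (o : Char) (hp : pickOp t = some o) :
    tokPieces t = partBefore o t :: [o] :: tokPieces (partAfter o t) := by
  rw [tokPieces.eq_def]
  split <;> simp_all

lemma tokPieces_none (t : List Char) (hp : pickOp t = none) :
    tokPieces t = [t] := by
  rw [tokPieces.eq_def]
  split <;> simp_all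

-- invariant of A's loop: the first i elements are finished pieces; everything from
-- position i on gets tokenised into tokPieces
lemma interpGo_eq (n : Nat) : ∀ (rest done : List (List Char)),
    (rest.map (fun t => t.length + 1)).sum ≤ n →
    interpGo (done ++ rest) done.length = done ++ rest.flatMap tokPieces := by
  induction n with
  | zero =>
    intro rest done hle
    have hrest : rest = [] := by
      cases rest with
      | nil => rfl
      | cons t r => simp at hle
    subst hrest
    rw [List.append_nil, interpGo_done _ _ (by omega)]
    simp
  | succ n ih =>
    intro rest done hle
    cases rest with
    | nil =>
      rw [List.append_nil, interpGo_done _ _ (by omega)]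
      simp
    | cons t r =>
      have hlen : done.length < (done ++ t :: r).length := by simp
      have hget : (done ++ t :: r)[done.length] = t := by
        rw [List.getElem_append_right (Nat.le_refl _)]
        simp
      have htake : (done ++ t :: r).take done.length = done := by
        simp
      have hdrop : (done ++ t :: r).drop (done.length + 1) = r := by
        rw [List.drop_append]
        simp
      cases hp : pickOp t with
      | some o =>
        rw [interpGo_split (done ++ t :: r) done.length hlen o (by rw [hget]; exact hp)]
        rw [hget, htake, hdrop]
        have hrw : done ++ [partBefore o t, [o], partAfter o t] ++ r
            = (done ++ [partBefore o t, [o]]) ++ (partAfter o t :: r) := by simp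
        have hsum : ((partAfter o t :: r).map (fun t => t.length + 1)).sum ≤ n := by
          have hlt := partAfter_lt o t (pickOp_some _ _ hp).1
          simp only [List.map_cons, List.sum_cons] at hle ⊢
          omega
        rw [hrw, show done.length + 2 = (done ++ [partBefore o t, [o]]).length by simp]
        rw [ih (partAfter o t :: r) (done ++ [partBefore o t, [o]]) hsum]
        simp [List.flatMap_cons, tokPieces_some t o hp]
      | none =>
        rw [interpGo_skip (done ++ t :: r) done.length hlen (by rw [hget]; exact hp)]
        rw [show done ++ t :: r = (done ++ [t]) ++ r by simp,
            show done.length + 1 = (done ++ [t]).length by simp]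
        have hsum : (r.map (fun t => t.length + 1)).sum ≤ n := by
          simp only [List.map_cons, List.sum_cons] at hle
          omega
        rw [ih r (done ++ [t]) hsum]
        simp [List.flatMap_cons, tokPieces_none t hp]

-- bridge lemmas between B's index arithmetic and A's partition on the current suffix

lemma findFrom1_none_iff (t : List Char) (cur : Nat) (o : Char) :
    findFrom1 t cur o = none ↔ o ∉ t.drop cur := by
  unfold findFrom1
  rw [Option.map_eq_none_iff, List.idxOf?_eq_none_iff]

lemma findFrom1_some_iff (t : List Char) (cur : Nat) (o : Char) (p : Nat) :
    findFrom1 t cur o = some p ↔ (t.drop cur).idxOf? o = some (p - cur) ∧ cur ≤ p := by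
  unfold findFrom1
  constructor
  · intro h
    cases hq : (t.drop cur).idxOf? o with
    | none => simp [hq] at h
    | some k =>
      rw [hq] at h
      simp only [Option.map_some, Option.some.injEq] at h
      exact ⟨congrArg some (by omega), by omega⟩
  · rintro ⟨h1, h2⟩
    rw [h1]
    simp only [Option.map_some, Option.some.injEq]
    omega

lemma mem_of_idxOf? {r : List Char} {o : Char} {k : Nat} (h : r.idxOf? o = some k) :
    o ∈ r := by
  obtain ⟨hw, hg, -⟩ := List.idxOf?_eq_some_iff.mp h
  exact hg ▸ List.getElem_mem hw

lemma idxOf?_take (r : List Char) (o : Char) : ∀ (k : Nat), r.idxOf? o = some k →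
    r.takeWhile (· ≠ o) = r.take k ∧ (r.dropWhile (· ≠ o)).drop 1 = r.drop (k + 1) := by
  induction r with
  | nil => intro k h; simp at h
  | cons a r ih =>
    intro k h
    rw [List.idxOf?_cons] at h
    by_cases ha : a = o
    · rw [if_pos (by simp [ha])] at h
      simp only [Option.some.injEq] at h
      subst h
      simp [ha]
    · rw [if_neg (by simp [ha])] at h
      cases hq : r.idxOf? o with
      | none => simp [hq] at h
      | some m =>
        rw [hq] at h
        simp only [Option.map_some, Option.some.injEq] at h
        subst h
        obtain ⟨ht, hd⟩ := ih m hq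
        constructor
        · rw [List.takeWhile_cons, List.take_succ_cons, if_pos (by simp [ha]), ht]
        · rw [List.drop_succ_cons, List.dropWhile_cons, if_pos (by simp [ha]), hd]

lemma pickFrom_none (t : List Char) (cur : Nat) (h : pickFrom t cur = none) :
    pickOp (t.drop cur) = none := by
  unfold pickFrom at h
  cases h1 : findFrom1 t cur '*' with
  | some q => simp [h1] at h
  | none =>
  cases h2 : findFrom1 t cur '/' with
  | some q => simp [h1, h2] at h
  | none =>
  cases h3 : findFrom1 t cur '+' with
  | some q => simp [h1, h2, h3] at h
  | none =>
  cases h4 : findFrom1 t cur '-' with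
  | some q => simp [h1, h2, h3, h4] at h
  | none =>
  have m1 := (findFrom1_none_iff t cur '*').mp h1
  have m2 := (findFrom1_none_iff t cur '/').mp h2
  have m3 := (findFrom1_none_iff t cur '+').mp h3
  have m4 := (findFrom1_none_iff t cur '-').mp h4
  unfold pickOp
  simp [m1, m2, m3, m4]

lemma pickFrom_some (t : List Char) (cur : Nat) (o : Char) (p : Nat)
    (hlen : 1 < t.length - cur) (h : pickFrom t cur = some (o, p)) :
    pickOp (t.drop cur) = some o ∧ (t.drop cur).idxOf? o = some (p - cur) := by
  have hdroplen : 1 < (t.drop cur).length := by simp; omega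
  unfold pickFrom at h
  unfold pickOp
  rw [if_pos hdroplen]
  cases h1 : findFrom1 t cur '*' with
  | some q =>
    rw [h1] at h
    simp only [Option.some.injEq, Prod.mk.injEq] at h
    obtain ⟨rfl, rfl⟩ := h
    have hs := (findFrom1_some_iff t cur '*' q).mp h1
    have hmem := mem_of_idxOf? hs.1
    exact ⟨by simp [hmem], hs.1⟩
  | none =>
  have m1 := (findFrom1_none_iff t cur '*').mp h1
  cases h2 : findFrom1 t cur '/' with
  | some q =>
    rw [h1, h2] at h
    simp only [Option.some.injEq, Prod.mk.injEq] at h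
    obtain ⟨rfl, rfl⟩ := h
    have hs := (findFrom1_some_iff t cur '/' q).mp h2
    have hmem := mem_of_idxOf? hs.1
    exact ⟨by simp [m1, hmem], hs.1⟩
  | none =>
  have m2 := (findFrom1_none_iff t cur '/').mp h2
  cases h3 : findFrom1 t cur '+' with
  | some q =>
    rw [h1, h2, h3] at h
    simp only [Option.some.injEq, Prod.mk.injEq] at h
    obtain ⟨rfl, rfl⟩ := h
    have hs := (findFrom1_some_iff t cur '+' q).mp h3
    have hmem := mem_of_idxOf? hs.1
    exact ⟨by simp [m1, m2, hmem], hs.1⟩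
  | none =>
  have m3 := (findFrom1_none_iff t cur '+').mp h3
  cases h4 : findFrom1 t cur '-' with
  | some q =>
    rw [h1, h2, h3, h4] at h
    simp only [Option.some.injEq, Prod.mk.injEq] at h
    obtain ⟨rfl, rfl⟩ := h
    have hs := (findFrom1_some_iff t cur '-' q).mp h4
    have hmem := mem_of_idxOf? hs.1
    exact ⟨by simp [m1, m2, m3, hmem], hs.1⟩
  | none => simp [h1, h2, h3, h4] at h

-- unfolding equations of emitTok
lemma emitTok_small (t : List Char) (cur : Nat) (hg : ¬ t.length - cur > 1) :
    emitTok t cur = [t.drop cur] := by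
  rw [emitTok, if_neg hg]

lemma emitTok_none (t : List Char) (cur : Nat) (hg : t.length - cur > 1)
    (hp : pickFrom t cur = none) : emitTok t cur = [t.drop cur] := by
  rw [emitTok, if_pos hg]
  split <;> simp_all

lemma emitTok_some (t : List Char) (cur : Nat) (o : Char) (p : Nat)
    (hg : t.length - cur > 1) (hp : pickFrom t cur = some (o, p)) :
    emitTok t cur = ((t.drop cur).take (p - cur)) :: [o] :: emitTok t (p + 1) := by
  rw [emitTok, if_pos hg]
  split <;> simp_all

-- B's cursor loop produces exactly A's pieces of the current suffix
lemma emitTok_eq (t : List Char) : ∀ cur, emitTok t cur = tokPieces (t.drop cur) := by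
  intro cur
  induction hn : t.length - cur using Nat.strong_induction_on generalizing cur with
  | _ n ih =>
  subst hn
  by_cases hg : t.length - cur > 1
  · cases hp : pickFrom t cur with
    | none =>
      rw [emitTok_none t cur hg hp, tokPieces_none _ (pickFrom_none t cur hp)]
    | some op =>
      obtain ⟨o, p⟩ := op
      obtain ⟨hpo, hidx⟩ := pickFrom_some t cur o p hg hp
      obtain ⟨hb, ha⟩ := idxOf?_take (t.drop cur) o (p - cur) hidx
      obtain ⟨hcp, hpl⟩ := pickFrom_some_bounds t cur o p hp
      rw [emitTok_some t cur o p hg hp, tokPieces_some _ _ hpo]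
      have hrec : emitTok t (p + 1) = tokPieces (t.drop (p + 1)) :=
        ih (t.length - (p + 1)) (by omega) (p + 1) rfl
      rw [hrec]
      congr 1
      · unfold partBefore
        rw [hb]
      · congr 1
        unfold partAfter
        rw [ha, List.drop_drop]
        congr 1
        congr 1
        omega
  · rw [emitTok_small t cur hg]
    have hnone : pickOp (t.drop cur) = none := by
      unfold pickOp
      rw [if_neg (by simp; omega)]
    rw [tokPieces_none _ hnone]

-- ===== VERDICT =====
theorem interpretate_spec : Claim_equal_interpretate := by
  intro s _
  unfold Spec_interpretate interpretate interpretate_alt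
  have h := interpGo_eq ((s.map String.toList).map (fun t => t.length + 1)).sum
      (s.map String.toList) [] (Nat.le_refl _)
  simp only [List.nil_append, List.length_nil] at h
  rw [h, List.flatMap_map]
  have hfun : (fun tok : String => emitTok tok.toList 0) = (fun tok : String => tokPieces tok.toList) := by
    funext tok
    rw [emitTok_eq tok.toList 0, List.drop_zero]
  rw [hfun]
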